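-- pv_equiv track=rewrite | github.com/Agilotext/Agilotext-Scripts-Public | CNOEC_Agiloshield_Docs/spacy-anon-8.0.12/anon/anon_replacer.py | _rib_account_to_digits
-- ===== SOURCE A (Python) =====
-- def _rib_account_to_digits(account: str) -> str:
--     trans = {
--         "A": "1", "J": "1",
--         "B": "2", "K": "2", "S": "2",
--         "C": "3", "L": "3", "T": "3",
--         "D": "4", "M": "4", "U": "4",
--         "E": "5", "N": "5", "V": "5",
--         "F": "6", "O": "6", "W": "6",
--         "G": "7", "P": "7", "X": "7",
--         "H": "8", "Q": "8", "Y": "8",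
--         "I": "9", "R": "9", "Z": "9",
--     }
--     out = []
--     for ch in (account or "").upper():
--         if "0" <= ch <= "9":
--             out.append(ch)
--         elif "A" <= ch <= "Z":
--             mapped = trans.get(ch)
--             if mapped is None:
--                 return ""
--             out.append(mapped)
--         else:
--             return ""
--     return "".join(out)
-- ===== SOURCE B (Python) =====
-- def _rib_account_to_digits(account: str) -> str:
--     s = (account or "").upper()
--     if any(not ('0' <= c <= '9' or 'A' <= c <= 'Z') for c in s):
--         return ""
--     digits = "12345678912345678923456789"
--     table = str.maketrans({chr(ord('A') + i): digits[i] for i in range(26)})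
--     return s.translate(table)
-- ===== Notes on version B (the rewrite author's own statement) =====
-- stated objective: idiomatic
-- what changed: Replaced A's single interleaved loop (accumulator with early return and per-character dict lookup) by a validate-then-transform decomposition: one pass checks every character is an ASCII digit or uppercase letter, then str.translate with a precomputed maketrans table does the conversion.
import Mathlib
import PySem

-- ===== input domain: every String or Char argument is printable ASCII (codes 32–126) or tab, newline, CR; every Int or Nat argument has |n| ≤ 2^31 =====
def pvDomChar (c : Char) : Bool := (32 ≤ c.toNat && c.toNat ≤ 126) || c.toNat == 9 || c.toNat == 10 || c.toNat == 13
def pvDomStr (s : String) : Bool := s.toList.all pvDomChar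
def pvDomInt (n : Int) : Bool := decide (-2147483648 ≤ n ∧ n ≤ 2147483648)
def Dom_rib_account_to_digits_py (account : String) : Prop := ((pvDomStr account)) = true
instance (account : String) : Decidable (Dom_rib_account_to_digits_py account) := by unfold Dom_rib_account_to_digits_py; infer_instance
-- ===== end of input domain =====

-- B replaces A's single interleaved loop (accumulator + early return) by a
-- validate-then-translate decomposition (idiomatic: str.translate on a table).

-- ===== PORT A =====
-- the literal `trans` dict of A, in insertion order
def ribTrans : PySem.Dict Char Char :=
  PySem.Dict.ofList [('A','1'),('J','1'),('B','2'),('K','2'),('S','2'),('C','3'),('L','3'),('T','3'),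
   ('D','4'),('M','4'),('U','4'),('E','5'),('N','5'),('V','5'),('F','6'),('O','6'),('W','6'),
   ('G','7'),('P','7'),('X','7'),('H','8'),('Q','8'),('Y','8'),('I','9'),('R','9'),('Z','9')]

-- A's for-loop with accumulator `out` and early `return ""`
def ribLoopA (out : List Char) : List Char → String
  | [] => String.ofList out.reverse
  | ch :: rest =>
    if '0' ≤ ch ∧ ch ≤ '9' then ribLoopA (ch :: out) rest
    else if 'A' ≤ ch ∧ ch ≤ 'Z' then
      match PySem.Dict.get? ribTrans ch with
      | none => ""
      | some mapped => ribLoopA (mapped :: out) rest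
    else ""

def rib_account_to_digits_py (account : String) : String :=
  ribLoopA [] (PySem.Str.upper (if account = "" then "" else account)).toList

-- ===== PORT B =====
def ribValid (c : Char) : Bool := ('0' ≤ c && c ≤ '9') || ('A' ≤ c && c ≤ 'Z')

-- the translate table: letter i of A..Z maps to digits[i]; other chars unchanged
def ribDigits : List Char := "12345678912345678923456789".toList

def ribTr (c : Char) : Char :=
  if 'A' ≤ c ∧ c ≤ 'Z' then ribDigits.getD (c.toNat - 65) c else c

def rib_account_to_digits_py_alt (account : String) : String :=
  let s := (PySem.Str.upper (if account = "" then "" else account)).toList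
  if s.any (fun c => !ribValid c) then ""
  else String.ofList (s.map ribTr)

-- ===== PRECONDITION & SPEC =====
def Spec_rib_account_to_digits_py (account : String) (out : String) : Prop := out = rib_account_to_digits_py_alt account
instance (account : String) (out : String) : Decidable (Spec_rib_account_to_digits_py account out) := by unfold Spec_rib_account_to_digits_py; infer_instance

-- ===== CLAIM (what is proved, stated in full; the proofs are below) =====
def Claim_equal_rib_account_to_digits_py : Prop := ∀ (account : String), Dom_rib_account_to_digits_py account → Spec_rib_account_to_digits_py account (rib_account_to_digits_py account)

-- ===== LEMMAS AND PROOFS =====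

-- on uppercase letters the dict lookup returns exactly B's table entry
lemma ribTrans_get_eq (c : Char) (h1 : 'A' ≤ c) (h2 : c ≤ 'Z') :
    PySem.Dict.get? ribTrans c = some (ribTr c) := by
  have hlo : 65 ≤ c.toNat := h1
  have hhi : c.toNat ≤ 90 := h2
  have hc : Char.ofNat c.toNat = c := Char.ofNat_toNat c
  interval_cases h : c.toNat <;> (rw [← hc]; decide)

-- a digit is not an uppercase letter, so ribTr leaves it unchanged
lemma ribTr_digit (c : Char) (_h1 : '0' ≤ c) (h2 : c ≤ '9') : ribTr c = c := by
  have : c.toNat ≤ 57 := h2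
  unfold ribTr
  rw [if_neg]
  rintro ⟨hA, -⟩
  have : 65 ≤ c.toNat := hA
  omega

-- loop characterisation: A's loop equals validate-then-map
lemma ribLoopA_eq (l : List Char) : ∀ acc : List Char,
    ribLoopA acc l = if l.all ribValid then String.ofList (acc.reverse ++ l.map ribTr) else "" := by
  induction l with
  | nil => intro acc; simp [ribLoopA]
  | cons ch rest ih =>
    intro acc
    by_cases hd : '0' ≤ ch ∧ ch ≤ '9'
    · have hv : ribValid ch = true := by
        unfold ribValid
        rw [Bool.or_eq_true, Bool.and_eq_true, Bool.and_eq_true]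
        exact Or.inl ⟨decide_eq_true hd.1, decide_eq_true hd.2⟩
      rw [show ribLoopA acc (ch :: rest) = ribLoopA (ch :: acc) rest from by
        simp [ribLoopA, hd]]
      rw [ih, List.all_cons, hv, Bool.true_and, List.map_cons, ribTr_digit ch hd.1 hd.2]
      split_ifs <;> simp
    · by_cases hl : 'A' ≤ ch ∧ ch ≤ 'Z'
      · have hv : ribValid ch = true := by
          unfold ribValid
          rw [Bool.or_eq_true, Bool.and_eq_true, Bool.and_eq_true]
          exact Or.inr ⟨decide_eq_true hl.1, decide_eq_true hl.2⟩
        rw [show ribLoopA acc (ch :: rest) = ribLoopA (ribTr ch :: acc) rest from by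
          simp [ribLoopA, hd, hl, ribTrans_get_eq ch hl.1 hl.2]]
        rw [ih, List.all_cons, hv, Bool.true_and, List.map_cons]
        split_ifs <;> simp
      · have hv : ribValid ch = false := by
          cases hvb : ribValid ch
          · rfl
          · exfalso
            simp only [ribValid, Bool.or_eq_true, Bool.and_eq_true, decide_eq_true_eq] at hvb
            rcases hvb with h | h
            · exact hd h
            · exact hl h
        rw [show ribLoopA acc (ch :: rest) = "" from by simp [ribLoopA, hd, hl]]
        rw [List.all_cons, hv]
        simp

-- A on a char list equals B's any/translate form
lemma ribMain (l : List Char) :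
    ribLoopA [] l = if (l.any fun c => !ribValid c) then "" else String.ofList (l.map ribTr) := by
  rw [ribLoopA_eq]
  by_cases hall : l.all ribValid = true
  · have hany : (l.any fun c => !ribValid c) = false := by
      rw [List.any_eq_false]
      intro c hc
      simp [List.all_eq_true.mp hall c hc]
    rw [if_pos hall, if_neg (by simp [hany]), List.reverse_nil, List.nil_append]
  · have hany : (l.any fun c => !ribValid c) = true := by
      rw [List.any_eq_true]
      have := Bool.eq_false_iff.mpr hall
      rw [List.all_eq_false] at this
      obtain ⟨c, hc, hcf⟩ := this
      exact ⟨c, hc, by simpa using hcf⟩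
    rw [if_neg hall, if_pos hany]

-- ===== VERDICT (by name: the statement is the Claim_ definition above) =====
theorem rib_account_to_digits_py_spec : Claim_equal_rib_account_to_digits_py := by
  intro account _
  exact ribMain ((PySem.Str.upper (if account = "" then "" else account)).toList)
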